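-- pv_equiv track=rewrite | github.com/wherby/code | contest/00000c361d112/d125/q4/t4.py | maximumValueSum
-- ===== SOURCE A (Python) =====
-- from typing import List, Tuple, Optional
--
-- def maximumValueSum(nums: List[int], k: int, edges: List[List[int]]) -> int:
--     ret = []
--     for a in nums:
--         abs = (a ^k)-a
--         ret.append(abs)
--     sm =sum(nums)
--     ret.sort(reverse= True)
--     n = len(ret)
--     for i in range(1,n,2):
--         if ret[i]+ret[i-1]>0:
--             sm += ret[i]+ ret[i-1]
--     return sm
-- ===== SOURCE B (Python) =====
-- def maximumValueSum(nums, k, edges):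
--     # One linear pass over the deltas instead of sort + pair scan:
--     # track sum/parity of positive deltas, the smallest positive delta,
--     # and the largest non-positive delta.
--     total = sum(nums)
--     pos_sum = 0
--     pos_cnt = 0
--     min_pos = None
--     max_nonpos = None
--     for a in nums:
--         d = (a ^ k) - a
--         if d > 0:
--             pos_sum += d
--             pos_cnt += 1
--             if min_pos is None or d < min_pos:
--                 min_pos = d
--         else:
--             if max_nonpos is None or d > max_nonpos:
--                 max_nonpos = d
--     if pos_cnt % 2 == 0:
--         return total + pos_sum
--     best = pos_sum - min_pos
--     if max_nonpos is not None and pos_sum + max_nonpos > best: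
--         best = pos_sum + max_nonpos
--     return total + best
-- ===== Notes on version B (the rewrite author's own statement) =====
-- stated objective: faster
-- what changed: Replaces A's sort-descending-then-scan-adjacent-pairs greedy with a single linear pass that tracks the sum and count of positive XOR-deltas, the smallest positive delta and the largest non-positive delta, then picks the best even-count total in O(1).
import Mathlib
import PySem

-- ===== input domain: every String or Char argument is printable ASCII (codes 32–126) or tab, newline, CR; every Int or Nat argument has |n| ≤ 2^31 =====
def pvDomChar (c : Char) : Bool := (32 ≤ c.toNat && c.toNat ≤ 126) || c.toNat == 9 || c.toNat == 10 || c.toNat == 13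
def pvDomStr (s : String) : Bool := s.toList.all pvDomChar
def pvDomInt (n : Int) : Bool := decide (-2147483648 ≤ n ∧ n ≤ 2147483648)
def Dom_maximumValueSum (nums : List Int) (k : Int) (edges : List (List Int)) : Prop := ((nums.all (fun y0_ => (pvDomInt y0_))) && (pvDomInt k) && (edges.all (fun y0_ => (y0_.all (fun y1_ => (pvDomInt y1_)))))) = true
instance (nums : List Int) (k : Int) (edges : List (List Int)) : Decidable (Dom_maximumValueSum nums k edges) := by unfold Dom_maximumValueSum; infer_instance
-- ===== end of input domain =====

-- B replaces A's sort-then-pair greedy with a single linear pass over the deltas (sum/count of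
-- positive deltas, smallest positive delta, largest non-positive delta); O(n) instead of O(n log n).

-- ===== PORT A =====
-- literal transliteration of A: build deltas, sum nums, sort descending, add every positive adjacent pair
def maximumValueSum (nums : List Int) (k : Int) (edges : List (List Int)) : Int :=
  let ret : List Int := nums.foldl (fun acc a => acc ++ [PySem.Int.bxor a k - a]) []
  let sm : Int := nums.sum
  let ret := PySem.List.sorted ret (fun x => x) true
  let n : Int := ret.length
  (PySem.List.pyRange 1 n 2).foldl (fun sm i =>
    if PySem.List.pyGetD ret i 0 + PySem.List.pyGetD ret (i - 1) 0 > 0 then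
      sm + (PySem.List.pyGetD ret i 0 + PySem.List.pyGetD ret (i - 1) 0)
    else sm) sm

-- ===== PORT B =====
-- state of B's single pass: (pos_sum, pos_cnt, min_pos, max_nonpos)
def bStep (st : Int × Int × Option Int × Option Int) (d : Int) :
    Int × Int × Option Int × Option Int :=
  if d > 0 then
    (st.1 + d, st.2.1 + 1,
     (match st.2.2.1 with | none => some d | some m => if d < m then some d else some m),
     st.2.2.2)
  else
    (st.1, st.2.1, st.2.2.1,
     (match st.2.2.2 with | none => some d | some M => if d > M then some d else some M))

-- B's tail: choose the best even-count value from the collected statistics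
def bFinal (total S c : Int) (m M : Option Int) : Int :=
  if PySem.Int.mod c 2 = 0 then total + S
  else
    -- when c is odd, min_pos is always set, so the .getD 0 default is never used
    let best := S - m.getD 0
    let best := match M with | none => best | some M0 => if S + M0 > best then S + M0 else best
    total + best

def maximumValueSum_alt (nums : List Int) (k : Int) (edges : List (List Int)) : Int :=
  let total : Int := nums.sum
  let st := nums.foldl (fun st a => bStep st (PySem.Int.bxor a k - a)) (0, 0, none, none)
  bFinal total st.1 st.2.1 st.2.2.1 st.2.2.2

-- ===== PRECONDITION & SPEC =====
def Spec_maximumValueSum (nums : List Int) (k : Int) (edges : List (List Int)) (out : Int) : Prop := out = maximumValueSum_alt nums k edges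
instance (nums : List Int) (k : Int) (edges : List (List Int)) (out : Int) : Decidable (Spec_maximumValueSum nums k edges out) := by unfold Spec_maximumValueSum; infer_instance

-- ===== CLAIM (what is proved, stated in full; the proofs are below) =====
def Claim_equal_maximumValueSum : Prop := ∀ (nums : List Int) (k : Int) (edges : List (List Int)), Dom_maximumValueSum nums k edges → Spec_maximumValueSum nums k edges (maximumValueSum nums k edges)

-- ===== LEMMAS AND PROOFS =====
theorem pyRange12 (N : Nat) :
    PySem.List.pyRange 1 (N : Int) 2 = (List.range (N / 2)).map (fun (k : Nat) => 1 + 2 * (k : Int)) := by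
  rw [PySem.List.pyRange_of_pos _ _ (by norm_num)]
  have h : (if (1:Int) < (N:Int) then (((N:Int) - 1 + 2 - 1) / 2).toNat else 0) = N / 2 := by
    split_ifs with h <;> omega
  rw [h]
theorem pyGetD_shift (x y : Int) (r : List Int) (i : Int) (d : Int) (h : 0 ≤ i) :
    PySem.List.pyGetD (x :: y :: r) (i + 2) d = PySem.List.pyGetD r i d := by
  obtain ⟨n, rfl⟩ := Int.eq_ofNat_of_zero_le h
  have h2 : (n : Int) + 2 = ((n + 2 : Nat) : Int) := by push_cast; ring
  rw [h2, PySem.List.pyGetD_natCast, PySem.List.pyGetD_natCast]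
  simp [List.getD]
def pairF : List Int → Int
  | [] => 0
  | [_] => 0
  | a :: b :: r => (if b + a > 0 then b + a else 0) + pairF r

theorem loop_eq_pairF (L : List Int) (sm : Int) :
    (PySem.List.pyRange 1 (L.length : Int) 2).foldl (fun sm i =>
      if PySem.List.pyGetD L i 0 + PySem.List.pyGetD L (i - 1) 0 > 0 then
        sm + (PySem.List.pyGetD L i 0 + PySem.List.pyGetD L (i - 1) 0)
      else sm) sm = sm + pairF L := by
  induction L using pairF.induct generalizing sm with
  | case1 => rw [pyRange12]; simp [pairF]
  | case2 a => rw [pyRange12]; simp [pairF]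
  | case3 a b r ih =>
    rw [show ((a :: b :: r).length : Int) = ((r.length + 2 : Nat) : Int) by simp; ring,
        pyRange12, show (r.length + 2) / 2 = r.length / 2 + 1 by omega,
        List.range_succ_eq_map, List.map_cons, List.foldl_cons, List.foldl_map]
    have hb : PySem.List.pyGetD (a :: b :: r) (1 + 2 * ((0 : Nat) : Int)) 0 = b := by
      norm_num [PySem.List.pyGetD, PySem.List.pyGet?, PySem.List.pyIdx?]
    have ha : PySem.List.pyGetD (a :: b :: r) (1 + 2 * ((0 : Nat) : Int) - 1) 0 = a := by
      norm_num [PySem.List.pyGetD, PySem.List.pyGet?, PySem.List.pyIdx?]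
      rw [if_pos (by positivity)]
      simp
    rw [hb, ha]
    have hext : ∀ (s : Int), ∀ x ∈ List.range (r.length / 2),
        (fun (s : Int) (x : Nat) =>
          if PySem.List.pyGetD (a :: b :: r) (1 + 2 * ((x.succ : Nat) : Int)) 0 +
              PySem.List.pyGetD (a :: b :: r) (1 + 2 * ((x.succ : Nat) : Int) - 1) 0 > 0 then
            s + (PySem.List.pyGetD (a :: b :: r) (1 + 2 * ((x.succ : Nat) : Int)) 0 +
              PySem.List.pyGetD (a :: b :: r) (1 + 2 * ((x.succ : Nat) : Int) - 1) 0)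
          else s) s x =
        (fun (s : Int) (x : Nat) =>
          if PySem.List.pyGetD r (1 + 2 * (x : Int)) 0 +
              PySem.List.pyGetD r (1 + 2 * (x : Int) - 1) 0 > 0 then
            s + (PySem.List.pyGetD r (1 + 2 * (x : Int)) 0 +
              PySem.List.pyGetD r (1 + 2 * (x : Int) - 1) 0)
          else s) s x := by
      intro s x _
      simp only
      rw [show (1 : Int) + 2 * ((x.succ : Nat) : Int) = (1 + 2 * (x : Int)) + 2 by push_cast; ring,
          pyGetD_shift _ _ _ _ _ (by omega),
          show (1 : Int) + 2 * (x : Int) + 2 - 1 = (1 + 2 * (x : Int) - 1) + 2 by ring,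
          pyGetD_shift _ _ _ _ _ (by omega)]
    rw [List.foldl_map, List.foldl_ext _ _ _ hext]
    have ih' : ∀ s : Int, (List.range (r.length / 2)).foldl (fun (s : Int) (x : Nat) =>
        if PySem.List.pyGetD r (1 + 2 * (x : Int)) 0 +
            PySem.List.pyGetD r (1 + 2 * (x : Int) - 1) 0 > 0 then
          s + (PySem.List.pyGetD r (1 + 2 * (x : Int)) 0 +
            PySem.List.pyGetD r (1 + 2 * (x : Int) - 1) 0)
        else s) s = s + pairF r := by
      intro s
      rw [← ih s, pyRange12, List.foldl_map]
    rw [ih']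
    simp only [pairF]
    split_ifs <;> ring




def pstep (o : Option Int) (d : Int) : Option Int :=
  match o with | none => some d | some m => if d < m then some d else some m
def nstep (o : Option Int) (d : Int) : Option Int :=
  match o with | none => some d | some M => if d > M then some d else some M

theorem pfold_some (l : List Int) (m : Int) :
    l.foldl pstep (some m) = some (l.foldl min m) := by
  induction l generalizing m with
  | nil => rfl
  | cons d t ih =>
    simp only [List.foldl_cons]
    rw [show pstep (some m) d = some (min m d) by
      simp only [pstep]; split_ifs with h <;> simp <;> omega, ih]

theorem pfold_eq_min? (l : List Int) : l.foldl pstep none = l.min? := by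
  cases l with
  | nil => rfl
  | cons x xs =>
    simp only [List.foldl_cons, show pstep none x = some x from rfl, pfold_some]
    simp [List.min?]

theorem nfold_some (l : List Int) (m : Int) :
    l.foldl nstep (some m) = some (l.foldl max m) := by
  induction l generalizing m with
  | nil => rfl
  | cons d t ih =>
    simp only [List.foldl_cons]
    rw [show nstep (some m) d = some (max m d) by
      simp only [nstep]; split_ifs with h <;> simp <;> omega, ih]

theorem nfold_eq_max? (l : List Int) : l.foldl nstep none = l.max? := by
  cases l with
  | nil => rfl
  | cons x xs =>
    simp only [List.foldl_cons, show nstep none x = some x from rfl, nfold_some]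
    simp [List.max?]

theorem min?_perm (l1 l2 : List Int) (h : l1.Perm l2) : l1.min? = l2.min? := by
  cases e1 : l1.min? with
  | none => cases e2 : l2.min? with
    | none => rfl
    | some v => rw [List.min?_eq_some_iff] at e2
                rw [List.min?_eq_none_iff] at e1
                have := h.mem_iff.mpr e2.1
                simp [e1] at this
  | some v =>
    rw [List.min?_eq_some_iff] at e1
    symm; rw [List.min?_eq_some_iff]
    exact ⟨h.mem_iff.mp e1.1, fun b hb => e1.2 b (h.mem_iff.mpr hb)⟩

theorem max?_perm (l1 l2 : List Int) (h : l1.Perm l2) : l1.max? = l2.max? := by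
  cases e1 : l1.max? with
  | none => cases e2 : l2.max? with
    | none => rfl
    | some v => rw [List.max?_eq_some_iff] at e2
                rw [List.max?_eq_none_iff] at e1
                have := h.mem_iff.mpr e2.1
                simp [e1] at this
  | some v =>
    rw [List.max?_eq_some_iff] at e1
    symm; rw [List.max?_eq_some_iff]
    exact ⟨h.mem_iff.mp e1.1, fun b hb => e1.2 b (h.mem_iff.mpr hb)⟩

theorem mod_add_two (c : Int) : PySem.Int.mod (c + 2) 2 = PySem.Int.mod c 2 := by
  simp [PySem.Int.mod]

theorem bFinal_shift (t S c : Int) (m M : Option Int) :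
    bFinal t S c m M = t + bFinal 0 S c m M := by
  simp only [bFinal]
  split_ifs with h
  · ring
  · cases M with
    | none => ring
    | some M0 => simp only []; split_ifs <;> ring

theorem bFinal_add_pair (x S c : Int) (m M : Option Int) :
    bFinal 0 (x + S) (c + 2) m M = x + bFinal 0 S c m M := by
  simp only [bFinal, mod_add_two]
  split_ifs with h
  · ring
  · cases M with
    | none => simp only []; ring
    | some M0 =>
      simp only []
      split_ifs with h1 h2 h2 <;> omega

theorem bfold_char (l : List Int) (S c : Int) (m M : Option Int) :
    l.foldl bStep (S, c, m, M) =
      (S + (l.filter (fun d => 0 < d)).sum,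
       c + ((l.filter (fun d => 0 < d)).length : Int),
       (l.filter (fun d => 0 < d)).foldl pstep m,
       (l.filter (fun d => d ≤ 0)).foldl nstep M) := by
  induction l generalizing S c m M with
  | nil => simp
  | cons d t ih =>
    simp only [List.foldl_cons]
    by_cases h : d > 0
    · rw [show bStep (S, c, m, M) d = (S + d, c + 1, pstep m d, M) by
        simp only [bStep, if_pos h]; rfl, ih]
      rw [List.filter_cons_of_pos (by simpa using h),
          List.filter_cons_of_neg (by simp; omega)]
      simp only [List.sum_cons, List.length_cons, List.foldl_cons]
      refine Prod.ext (by ring) (Prod.ext (by push_cast; ring) rfl)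
    · rw [show bStep (S, c, m, M) d = (S, c, m, nstep M d) by
        simp only [bStep, if_neg h]; rfl, ih]
      rw [List.filter_cons_of_neg (by simpa using h),
          List.filter_cons_of_pos (by simp; omega)]
      simp only [List.foldl_cons]




theorem bFinal_even (t S c : Int) (m M : Option Int) (h : PySem.Int.mod c 2 = 0) :
    bFinal t S c m M = t + S := by rw [bFinal, if_pos h]

theorem pairF_nonpos (L : List Int) (h : ∀ x ∈ L, x ≤ 0) : pairF L = 0 := by
  induction L using pairF.induct with
  | case1 => rfl
  | case2 a => rfl
  | case3 a b r ih =>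
    have ha := h a (by simp)
    have hb := h b (by simp)
    simp only [pairF, if_neg (by omega : ¬ b + a > 0)]
    rw [ih (fun x hx => h x (by simp [hx]))]
    ring

theorem min?_cons_cons_of_le (a b : Int) (P : List Int) (hab : b ≤ a)
    (hP : ∀ x ∈ P, x ≤ b) (hne : P ≠ []) : (a :: b :: P).min? = P.min? := by
  cases P with
  | nil => cases hne rfl
  | cons p ps =>
    obtain ⟨v, hv⟩ : ∃ v, (p :: ps).min? = some v := ⟨ps.foldl min p, by simp [List.min?]⟩
    rw [hv]
    rw [List.min?_eq_some_iff] at hv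
    rw [List.min?_eq_some_iff]
    have hvb : v ≤ b := hP v hv.1
    refine ⟨by simp [hv.1], ?_⟩
    intro x hx
    rcases List.mem_cons.mp hx with rfl | hx
    · omega
    rcases List.mem_cons.mp hx with rfl | hx
    · exact hvb
    · exact hv.2 x hx

theorem max?_cons_of_ge (b : Int) (r : List Int) (h : ∀ x ∈ r, x ≤ b) :
    (b :: r).max? = some b := by
  rw [List.max?_eq_some_iff]
  refine ⟨by simp, ?_⟩
  intro x hx
  rcases List.mem_cons.mp hx with rfl | hx
  · exact le_refl x
  · exact h x hx

theorem pairF_eq_final (L : List Int) (hs : L.Pairwise (fun a b => b ≤ a)) :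
    pairF L = bFinal 0 ((L.filter (fun d => 0 < d)).sum)
      (((L.filter (fun d => 0 < d)).length : Int))
      ((L.filter (fun d => 0 < d)).min?)
      ((L.filter (fun d => d ≤ 0)).max?) := by
  induction L using pairF.induct with
  | case1 => simp [pairF, bFinal, PySem.Int.mod]
  | case2 a =>
    by_cases ha : 0 < a
    · rw [show [a].filter (fun d => 0 < d) = [a] by
          rw [List.filter_cons_of_pos (by simpa using ha)]; rfl,
          show [a].filter (fun d => d ≤ 0) = [] by
          rw [List.filter_cons_of_neg (by simp; omega)]; rfl]
      simp [pairF, bFinal, PySem.Int.mod, List.min?]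
    · rw [show [a].filter (fun d => 0 < d) = [] by
          rw [List.filter_cons_of_neg (by simpa using ha)]; rfl,
          show [a].filter (fun d => d ≤ 0) = [a] by
          rw [List.filter_cons_of_pos (by simp; omega)]; rfl]
      simp [pairF, bFinal, PySem.Int.mod]
  | case3 a b r ih =>
    rw [List.pairwise_cons] at hs
    obtain ⟨h1, hs⟩ := hs
    rw [List.pairwise_cons] at hs
    obtain ⟨h2, hsr⟩ := hs
    have ih := ih hsr
    have hab : b ≤ a := h1 b (by simp)
    by_cases hb : 0 < b
    · have ha : 0 < a := lt_of_lt_of_le hb hab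
      rw [show (a :: b :: r).filter (fun d => 0 < d)
            = a :: b :: r.filter (fun d => 0 < d) by
          rw [List.filter_cons_of_pos (by simpa using ha),
              List.filter_cons_of_pos (by simpa using hb)],
          show (a :: b :: r).filter (fun d => d ≤ 0) = r.filter (fun d => d ≤ 0) by
          rw [List.filter_cons_of_neg (by simp; omega),
              List.filter_cons_of_neg (by simp; omega)]]
      simp only [pairF, if_pos (by omega : b + a > 0)]
      cases eP : r.filter (fun d => 0 < d) with
      | nil =>
        rw [eP] at ih
        simp only [List.sum_cons, List.length_cons, List.sum_nil, List.length_nil]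
        rw [bFinal_even _ _ _ _ _ (by simp [PySem.Int.mod])]
        rw [ih, bFinal_even _ _ _ _ _ (by simp [PySem.Int.mod])]
        simp
        ring
      | cons p ps =>
        have hPle : ∀ x ∈ r.filter (fun d => 0 < d), x ≤ b := by
          intro x hx
          exact h2 x (List.mem_of_mem_filter hx)
        rw [eP] at hPle
        rw [min?_cons_cons_of_le a b (p :: ps) hab hPle (by simp)]
        have key : ∀ Mx : Option Int, bFinal 0 ((a :: b :: p :: ps).sum)
            (((a :: b :: p :: ps).length : Int)) ((p :: ps).min?) Mx
            = (b + a) + bFinal 0 ((p :: ps).sum) (((p :: ps).length : Int))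
              ((p :: ps).min?) Mx := by
          intro Mx
          have e1 : (a :: b :: p :: ps).sum = (b + a) + (p :: ps).sum := by
            simp [List.sum_cons]; ring
          have e2 : (((a :: b :: p :: ps).length : Int)) = ((p :: ps).length : Int) + 2 := by
            simp [List.length_cons]; ring
          rw [e1, e2, bFinal_add_pair]
        rw [key]
        rw [eP] at ih
        rw [ih]
    · by_cases ha : 0 < a
      · have hr0 : ∀ x ∈ r, x ≤ 0 := fun x hx => le_trans (h2 x hx) (by omega)
        rw [show (a :: b :: r).filter (fun d => 0 < d) = [a] by
            rw [List.filter_cons_of_pos (by simpa using ha),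
                List.filter_cons_of_neg (by simp; omega),
                List.filter_eq_nil_iff.mpr (by intro x hx; simp; exact by have := hr0 x hx; omega)],
           show (a :: b :: r).filter (fun d => d ≤ 0) = b :: r by
            rw [List.filter_cons_of_neg (by simp; omega),
                List.filter_cons_of_pos (by simp; omega),
                List.filter_eq_self.mpr (by intro x hx; simp; exact hr0 x hx)]]
        rw [max?_cons_of_ge b r h2]
        simp only [pairF]
        rw [pairF_nonpos r hr0]
        simp [bFinal, PySem.Int.mod, List.min?]
        split_ifs <;> omega
      · have hall : ∀ x ∈ a :: b :: r, x ≤ 0 := by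
          intro x hx
          rcases List.mem_cons.mp hx with rfl | hx
          · omega
          rcases List.mem_cons.mp hx with rfl | hx
          · omega
          · exact le_trans (h2 x hx) (by omega)
        rw [List.filter_eq_nil_iff.mpr (by intro x hx; simp; have := hall x hx; omega)]
        rw [pairF_nonpos _ hall]
        simp [bFinal, PySem.Int.mod]

-- ===== VERDICT (by name: the statement is the Claim_ definition above) =====
theorem maximumValueSum_spec : Claim_equal_maximumValueSum := by
  intro nums k edges _
  unfold Spec_maximumValueSum
  unfold maximumValueSum maximumValueSum_alt
  simp only [PySem.List.foldl_append_singleton_eq_map, List.nil_append]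
  rw [loop_eq_pairF]
  rw [pairF_eq_final _ (by
    simpa using PySem.List.sorted_pairwise_rev
      (nums.map (fun a => PySem.Int.bxor a k - a)) (fun x => x))]
  rw [show nums.foldl (fun st a => bStep st (PySem.Int.bxor a k - a))
        ((0 : Int), (0 : Int), (none : Option Int), (none : Option Int))
      = (nums.map (fun a => PySem.Int.bxor a k - a)).foldl bStep (0, 0, none, none) from
      List.foldl_map.symm]
  rw [bfold_char]
  simp only [zero_add]
  rw [pfold_eq_min?, nfold_eq_max?, bFinal_shift nums.sum]
  have hperm := PySem.List.sorted_perm (nums.map (fun a => PySem.Int.bxor a k - a)) (fun x => x) true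
  have h1 := hperm.filter (fun d => decide (0 < d))
  have h2 := hperm.filter (fun d => decide (d ≤ 0))
  rw [h1.sum_eq, h1.length_eq, min?_perm _ _ h1, max?_perm _ _ h2]
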